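-- pv_equiv track=rewrite | github.com/ductd97/hackerRankChallengeSolved | biggerIsGreater.py | findMinStr
-- ===== SOURCE A (Python) =====
-- def findPivot(value, array, type='min'):
--     pivot = -1
--     for i, v in enumerate(array):
--         if type == 'max' and value > v:
--             pivot = i
--             break
--         elif type == 'min' and value < v:
--             pivot = i
--     return pivot
--
-- def findMinStr(array):
--     if len(array) == 1:
--         return array
--     pivot = -1
--     for i, v in enumerate(array):
--         pivot = findPivot(v, array[i+1:])
--         if pivot != -1:
--             pivot = pivot + i + 1
--             array[pivot], array[i] = array[i], array[pivot]
--             break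
--     if pivot != -1:
--         s = findMinStr(array[:-1])
--         s.append(array[-1])
--         return s
--     else:
--         return array
-- ===== SOURCE B (Python) =====
-- def findMinStr(array):
--     work = array
--     stack = []
--     base = None
--     while True:
--         n = len(work)
--         if n <= 1:
--             base = work
--             break
--         # suffix maxima: smax[t] = max(work[t:])
--         smax = [work[n - 1]]
--         for t in range(n - 2, -1, -1):
--             smax.append(work[t] if work[t] > smax[-1] else smax[-1])
--         smax.reverse()
--         # first index with a strictly greater element somewhere after it
--         i = None
--         for t in range(n - 1):
--             if work[t] < smax[t + 1]:
--                 i = t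
--                 break
--         if i is None:
--             base = work
--             break
--         # last index holding an element greater than work[i]
--         j = n - 1
--         while not (work[i] < work[j]):
--             j -= 1
--         work[j], work[i] = work[i], work[j]
--         stack.append(work[-1])
--         work = work[:-1]
--     if not stack:
--         return base
--     return base + stack[::-1]
-- ===== Notes on version B (the rewrite author's own statement) =====
-- stated objective: faster
-- what changed: Replaces A's recursion and per-index pivot search (a slice copy plus a full rescan of each suffix via findPivot) by an explicit peel loop with a stack that does one backward suffix-maxima pass per level, then picks the first index beaten by its suffix maximum and finds the matching last greater element by a single backward walk.
import Mathlib
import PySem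

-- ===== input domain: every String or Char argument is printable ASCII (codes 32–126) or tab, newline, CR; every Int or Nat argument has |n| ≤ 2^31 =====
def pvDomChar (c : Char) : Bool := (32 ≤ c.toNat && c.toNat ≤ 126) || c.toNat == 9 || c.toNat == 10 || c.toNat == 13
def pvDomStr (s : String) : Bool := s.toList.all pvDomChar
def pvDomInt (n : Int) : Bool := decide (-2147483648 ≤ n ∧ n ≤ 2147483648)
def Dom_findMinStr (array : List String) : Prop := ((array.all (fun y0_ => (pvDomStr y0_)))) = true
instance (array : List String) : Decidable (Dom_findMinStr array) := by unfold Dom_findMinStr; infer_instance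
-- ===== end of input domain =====

-- B replaces A's per-level pivot search (a slice plus a full rescan of every suffix via findPivot)
-- and its deep recursion by an explicit peel loop with a stack doing one suffix-maxima pass per level.
-- Both A and B mutate the argument list in place by the same single top-level swap; the equivalence
-- proved here is about the RETURN value.

-- ===== PORT A =====
-- findPivot's loop: `pivot` carries the last hit for 'min', breaks on the first hit for 'max'
def findPivotAux (value : String) (ty : String) : List String → Nat → Int → Int
  | [], _, pivot => pivot
  | v :: rest, i, pivot =>
    if ty = "max" ∧ v < value then (i : Int)
    else if ty = "min" ∧ value < v then findPivotAux value ty rest (i + 1) (i : Int)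
    else findPivotAux value ty rest (i + 1) pivot

def findPivot (value : String) (array : List String) (ty : String) : Int :=
  findPivotAux value ty array 0 (-1)

-- the simultaneous assignment  array[pivot], array[i] = array[i], array[pivot]
def swapL (l : List String) (i j : Nat) : List String :=
  (l.set j (l.getD i "")).set i (l.getD j "")

-- A's outer `for i, v in enumerate(array)` with its break, walking the list (the tail at
-- position i is exactly the slice array[i+1:]): first i whose suffix holds a pivot,
-- paired with the absolute pivot index
def scanA : List String → Nat → Option (Nat × Nat)
  | [], _ => none
  | v :: rest, i =>
    let p := findPivot v rest "min"
    if p ≠ -1 then some (i, (p + i + 1).toNat)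
    else scanA rest (i + 1)

-- the recursion `s = findMinStr(array[:-1])`, fuelled by the length (each call peels one element)
def findMinStrGo : Nat → List String → List String
  | 0, array => array
  | fuel + 1, array =>
    if array.length == 1 then array
    else
      match scanA array 0 with
      | some (i, p) =>
        let arr := swapL array i p
        findMinStrGo fuel arr.dropLast ++ [arr.getLastD ""]
      | none => array

def findMinStr (array : List String) : List String :=
  findMinStrGo array.length array

-- ===== PORT B =====
-- the backward pass building the suffix-maxima list (Source B appends then reverses;
-- pushing to the front builds the already-reversed list)
def smaxAux (work : List String) : Nat → List String → List String
  | 0, acc => acc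
  | t + 1, acc =>
    smaxAux work t ((if acc.headD "" < work.getD t "" then work.getD t "" else acc.headD "") :: acc)

-- `for t in range(n-1): if work[t] < smax[t+1]: i = t; break`, fuelled countdown on the range
def scanIGo (work smax : List String) : Nat → Nat → Option Nat
  | _, 0 => none
  | i, c + 1 =>
    if i + 1 < work.length then
      if work.getD i "" < smax.getD (i + 1) "" then some i
      else scanIGo work smax (i + 1) c
    else none

-- `j = n-1; while not (work[i] < work[j]): j -= 1`  (the loop never reaches 0 when a hit exists)
def scanJ (work : List String) (v : String) : Nat → Nat
  | 0 => 0
  | j + 1 => if v < work.getD (j + 1) "" then j + 1 else scanJ work v j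

-- the while-loop peeling one element per iteration, fuelled by the length
def loopBGo : Nat → List String → List String → List String × List String
  | 0, work, stack => (work, stack)
  | fuel + 1, work, stack =>
    if work.length ≤ 1 then (work, stack)
    else
      let smax := smaxAux work (work.length - 1) [work.getD (work.length - 1) ""]
      match scanIGo work smax 0 work.length with
      | none => (work, stack)
      | some i =>
        let j := scanJ work (work.getD i "") (work.length - 1)
        let w := swapL work i j
        loopBGo fuel w.dropLast (stack ++ [w.getLastD ""])

def findMinStr_alt (array : List String) : List String :=
  let r := loopBGo array.length array []
  if r.2.isEmpty then r.1 else r.1 ++ r.2.reverse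

-- ===== PRECONDITION & SPEC =====
def Spec_findMinStr (array : List String) (out : List String) : Prop := out = findMinStr_alt array
instance (array : List String) (out : List String) : Decidable (Spec_findMinStr array out) := by unfold Spec_findMinStr; infer_instance

-- ===== CLAIM (what is proved, stated in full; the proofs are below) =====
def Claim_equal_findMinStr : Prop := ∀ (array : List String), Dom_findMinStr array → Spec_findMinStr array (findMinStr array)

-- ===== LEMMAS AND PROOFS =====

-- last index k with v < l[k], scanned forward (mirrors findPivot's 'min' carry)
def lastRel (v : String) : List String → Option Nat
  | [] => none
  | x :: rest =>
    match lastRel v rest with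
    | some k => some (k + 1)
    | none => if v < x then some 0 else none

-- maximum of a list of strings, in the exact conditional shape the ports use
def sufMax : List String → String
  | [] => ""
  | x :: rest => if sufMax rest < x then x else sufMax rest

theorem not_lt_empty (v : String) : ¬ v < "" := by
  simp [String.lt_iff_toList_lt]

theorem empty_lt_of_ne (x : String) (h : x ≠ "") : "" < x := by
  rw [String.lt_iff_toList_lt]
  cases hx : x.toList with
  | nil => exact absurd (by simpa [String.toList_eq_nil_iff] using hx) h
  | cons c cs => exact List.nil_lt_cons c cs

theorem getD_drop (l : List String) (m n : Nat) :
    (l.drop m).getD n "" = l.getD (m + n) "" := by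
  simp [List.getD_eq_getElem?_getD, List.getElem?_drop]

theorem findPivotAux_min (v : String) (l : List String) :
    ∀ (idx : Nat) (pivot : Int),
      findPivotAux v "min" l idx pivot =
        (match lastRel v l with
         | some k => ((idx + k : Nat) : Int)
         | none => pivot) := by
  induction l with
  | nil => intro idx pivot; rfl
  | cons x rest ih =>
    intro idx pivot
    simp only [findPivotAux, lastRel]
    by_cases hv : v < x
    · rw [if_neg (by simp), if_pos (by simp [hv]), ih]
      cases hL : lastRel v rest with
      | some k =>
        simp only [hL]
        rw [show idx + 1 + k = idx + (k + 1) from by omega]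
      | none => simp only [hL, if_pos hv]; simp
    · rw [if_neg (by simp), if_neg (by simp [hv]), ih]
      cases hL : lastRel v rest with
      | some k =>
        simp only [hL]
        rw [show idx + 1 + k = idx + (k + 1) from by omega]
      | none => simp only [hL, if_neg hv]

theorem lastRel_none_iff (v : String) (l : List String) :
    lastRel v l = none ↔ ¬ v < sufMax l := by
  induction l with
  | nil => simp [lastRel, sufMax, not_lt_empty v]
  | cons x rest ih =>
    simp only [lastRel, sufMax]
    cases hL : lastRel v rest with
    | some k =>
      have hvs : v < sufMax rest := by
        by_contra hc
        rw [← ih] at hc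
        rw [hL] at hc
        exact absurd hc (by simp)
      simp only
      constructor
      · intro h; exact absurd h (by simp)
      · intro h
        exfalso
        apply h
        by_cases hsx : sufMax rest < x
        · rw [if_pos hsx]; exact lt_trans hvs hsx
        · rw [if_neg hsx]; exact hvs
    | none =>
      have hvs : ¬ v < sufMax rest := ih.mp hL
      simp only
      by_cases hvx : v < x
      · rw [if_pos hvx]
        constructor
        · intro h; exact absurd h (by simp)
        · intro h
          exfalso
          apply h
          by_cases hsx : sufMax rest < x
          · rw [if_pos hsx]; exact hvx
          · rw [if_neg hsx]; exact lt_of_lt_of_le hvx (not_lt.mp hsx)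
      · rw [if_neg hvx]
        constructor
        · intro _
          by_cases hsx : sufMax rest < x
          · rw [if_pos hsx]; exact hvx
          · rw [if_neg hsx]; exact hvs
        · intro _; rfl

theorem lastRel_none_all (v : String) (l : List String) (h : lastRel v l = none) :
    ∀ m, ¬ v < l.getD m "" := by
  induction l with
  | nil => intro m; simpa using not_lt_empty v
  | cons x rest ih =>
    simp only [lastRel] at h
    cases hL : lastRel v rest with
    | some k => rw [hL] at h; exact absurd h (by simp)
    | none =>
      rw [hL] at h
      have hvx : ¬ v < x := by
        by_contra hc
        rw [if_pos hc] at h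
        exact absurd h (by simp)
      intro m
      cases m with
      | zero => simpa using hvx
      | succ m => simpa using ih hL m

theorem lastRel_some (v : String) (l : List String) :
    ∀ k, lastRel v l = some k →
      k < l.length ∧ v < l.getD k "" ∧ ∀ m, k < m → ¬ v < l.getD m "" := by
  induction l with
  | nil => intro k h; exact absurd h (by simp [lastRel])
  | cons x rest ih =>
    intro k h
    simp only [lastRel] at h
    cases hL : lastRel v rest with
    | some k' =>
      rw [hL] at h
      have hk : k = k' + 1 := by simpa using h.symm
      subst hk
      obtain ⟨h1, h2, h3⟩ := ih k' hL
      refine ⟨by simpa using h1, by simpa using h2, ?_⟩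
      intro m hm
      cases m with
      | zero => omega
      | succ m => simpa using h3 m (by omega)
    | none =>
      rw [hL] at h
      by_cases hvx : v < x
      · rw [if_pos hvx] at h
        have hk : k = 0 := by simpa using h.symm
        subst hk
        refine ⟨by simp, by simpa using hvx, ?_⟩
        intro m hm
        cases m with
        | zero => omega
        | succ m => simpa using lastRel_none_all v rest hL m
      · rw [if_neg hvx] at h
        exact absurd h (by simp)

-- the suffix-maxima list computed by B
def smaxSpec (full : List String) : List String :=
  (List.range full.length).map (fun k => sufMax (full.drop k))

theorem sufMax_single (x : String) : sufMax [x] = x := by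
  by_cases h : x = ""
  · simp [sufMax, h]
  · simp [sufMax, empty_lt_of_ne x h]

theorem smaxAux_inv (work : List String) :
    ∀ t, t < work.length →
      smaxAux work t ((List.range' t (work.length - t)).map (fun k => sufMax (work.drop k)))
        = smaxSpec work := by
  intro t
  induction t with
  | zero => intro _; simp [smaxAux, smaxSpec, List.range_eq_range']
  | succ t ih =>
    intro ht
    have ht' : t < work.length := by omega
    have hsplit : List.range' (t + 1) (work.length - (t + 1))
        = (t + 1) :: List.range' (t + 2) (work.length - (t + 2)) := by
      rw [show work.length - (t + 1) = (work.length - (t + 2)) + 1 from by omega, List.range'_succ]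
    rw [hsplit]
    simp only [List.map_cons, smaxAux, List.headD_cons]
    have hdrop : work.drop t = work[t] :: work.drop (t + 1) := List.drop_eq_getElem_cons ht'
    have hgetD : work.getD t "" = work[t] := List.getD_eq_getElem work "" ht'
    have hnew : (if sufMax (work.drop (t + 1)) < work.getD t "" then work.getD t ""
        else sufMax (work.drop (t + 1))) = sufMax (work.drop t) := by
      rw [hgetD, hdrop]; simp [sufMax]
    rw [hnew]
    have hcons : sufMax (work.drop t) :: sufMax (work.drop (t + 1)) ::
        (List.range' (t + 2) (work.length - (t + 2))).map (fun k => sufMax (work.drop k))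
        = (List.range' t (work.length - t)).map (fun k => sufMax (work.drop k)) := by
      rw [show work.length - t = (work.length - (t + 1)) + 1 from by omega, List.range'_succ,
        hsplit]
      simp
    rw [hcons]
    exact ih ht'

theorem smaxAux_eq (work : List String) (h : 0 < work.length) :
    smaxAux work (work.length - 1) [work.getD (work.length - 1) ""] = smaxSpec work := by
  have h1 : work.length - 1 < work.length := by omega
  have hd : work.drop (work.length - 1) = [work[work.length - 1]] := by
    rw [List.drop_eq_getElem_cons h1,
      show work.length - 1 + 1 = work.length from by omega, List.drop_length]
  have hinit : [work.getD (work.length - 1) ""]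
      = (List.range' (work.length - 1) (work.length - (work.length - 1))).map
          (fun k => sufMax (work.drop k)) := by
    rw [show work.length - (work.length - 1) = 1 from by omega, List.range'_one]
    simp only [List.map_cons, List.map_nil]
    rw [hd, sufMax_single, List.getD_eq_getElem work "" h1]
  rw [hinit]
  exact smaxAux_inv work (work.length - 1) h1

theorem smaxSpec_getD (work : List String) (m : Nat) (hm : m < work.length) :
    (smaxSpec work).getD m "" = sufMax (work.drop m) := by
  have hlen : m < (smaxSpec work).length := by simpa [smaxSpec] using hm
  rw [List.getD_eq_getElem _ "" hlen]
  simp [smaxSpec]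

theorem scanJ_eq (work : List String) (v : String) :
    ∀ (J j : Nat), j ≤ J → v < work.getD j "" →
      (∀ m, j < m → ¬ v < work.getD m "") → scanJ work v J = j := by
  intro J
  induction J with
  | zero =>
    intro j hj hv _
    have : j = 0 := by omega
    subst this
    rfl
  | succ J ih =>
    intro j hj hv hub
    simp only [scanJ]
    by_cases hJ : v < work.getD (J + 1) ""
    · rw [if_pos hJ]
      rcases Nat.lt_or_ge j (J + 1) with hlt | hge
      · exact absurd hJ (hub _ hlt)
      · omega
    · rw [if_neg hJ]
      have hjJ : j ≤ J := by
        rcases Nat.lt_or_ge j (J + 1) with hlt | hge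
        · omega
        · exfalso; have : j = J + 1 := by omega
          subst this; exact hJ hv
      exact ih j hjJ hv hub

theorem scanA_eq (full : List String) :
    ∀ i, scanA (full.drop i) i =
      (match scanIGo full (smaxSpec full) i (full.length - i) with
       | none => none
       | some i' => some (i', scanJ full (full.getD i' "") (full.length - 1))) := by
  have H : ∀ d i, full.length - i ≤ d → scanA (full.drop i) i =
      (match scanIGo full (smaxSpec full) i (full.length - i) with
       | none => none
       | some i' => some (i', scanJ full (full.getD i' "") (full.length - 1))) := by
    intro d
    induction d with
    | zero =>
      intro i hi
      rw [List.drop_eq_nil_of_le (by omega), show full.length - i = 0 from by omega]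
      rfl
    | succ d ih =>
      intro i hi
      by_cases h : i < full.length
      · have hdrop : full.drop i = full.getD i "" :: full.drop (i + 1) := by
          rw [List.getD_eq_getElem full "" h]
          exact List.drop_eq_getElem_cons h
        rw [hdrop]
        simp only [scanA]
        cases hL : lastRel (full.getD i "") (full.drop (i + 1)) with
        | some k =>
          obtain ⟨hk, hvk, hub⟩ := lastRel_some (full.getD i "") (full.drop (i + 1)) k hL
          rw [List.length_drop] at hk
          have hi1 : i + 1 < full.length := by omega
          have hp : findPivot (full.getD i "") (full.drop (i + 1)) "min" = (k : Int) := by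
            rw [findPivot, findPivotAux_min, hL]; simp
          simp only [hp]
          rw [if_pos (show (k : Int) ≠ -1 by omega)]
          have hvs : full.getD i "" < sufMax (full.drop (i + 1)) := by
            by_contra hc
            rw [← lastRel_none_iff] at hc
            rw [hL] at hc
            exact absurd hc (by simp)
          rw [show full.length - i = (full.length - (i + 1)) + 1 from by omega]
          simp only [scanIGo]
          rw [if_pos hi1, smaxSpec_getD full (i + 1) hi1, if_pos hvs]
          have hvk' : full.getD i "" < full.getD (i + 1 + k) "" := by
            rw [← getD_drop]; exact hvk
          have hub' : ∀ m, i + 1 + k < m → ¬ full.getD i "" < full.getD m "" := by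
            intro m hm
            have he : i + 1 + (m - (i + 1)) = m := by omega
            have := hub (m - (i + 1)) (by omega)
            rw [getD_drop, he] at this
            exact this
          have hJ : scanJ full (full.getD i "") (full.length - 1) = i + 1 + k :=
            scanJ_eq full _ (full.length - 1) (i + 1 + k) (by omega) hvk' hub'
          simp only [hJ, Option.some.injEq, Prod.mk.injEq, true_and]
          omega
        | none =>
          have hp : findPivot (full.getD i "") (full.drop (i + 1)) "min" = -1 := by
            rw [findPivot, findPivotAux_min, hL]
          simp only [hp]
          rw [if_neg (by simp)]
          have hnv : ¬ full.getD i "" < sufMax (full.drop (i + 1)) :=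
            (lastRel_none_iff _ _).mp hL
          rw [ih (i + 1) (by omega)]
          by_cases hi1 : i + 1 < full.length
          · have hsI : scanIGo full (smaxSpec full) i (full.length - i)
                = scanIGo full (smaxSpec full) (i + 1) (full.length - (i + 1)) := by
              rw [show full.length - i = (full.length - (i + 1)) + 1 from by omega]
              simp only [scanIGo]
              rw [if_pos hi1, smaxSpec_getD full (i + 1) hi1, if_neg hnv]
            rw [hsI]
          · have hsI : scanIGo full (smaxSpec full) i (full.length - i) = none := by
              rw [show full.length - i = 0 + 1 from by omega]
              simp only [scanIGo]
              rw [if_neg hi1]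
            have hsI2 : scanIGo full (smaxSpec full) (i + 1) (full.length - (i + 1)) = none := by
              rw [show full.length - (i + 1) = 0 from by omega]
              simp only [scanIGo]
            rw [hsI, hsI2]
      · rw [List.drop_eq_nil_of_le (by omega), show full.length - i = 0 from by omega]
        rfl
  exact fun i => H full.length i (by omega)

theorem scanA_zero (full : List String) :
    scanA full 0 =
      (match scanIGo full (smaxSpec full) 0 full.length with
       | none => none
       | some i' => some (i', scanJ full (full.getD i' "") (full.length - 1))) := by
  have := scanA_eq full 0
  rwa [List.drop_zero, Nat.sub_zero] at this

theorem findMinStrGo_short (fuel : Nat) (work : List String) (h : work.length ≤ 1) :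
    findMinStrGo fuel work = work := by
  cases fuel with
  | zero => rfl
  | succ fuel =>
    simp only [findMinStrGo]
    by_cases h1 : work.length = 1
    · simp [h1]
    · have h0 : work.length = 0 := by omega
      have hnil : work = [] := List.length_eq_zero_iff.mp h0
      subst hnil
      simp [scanA]

theorem loopBGo_eq : ∀ (fuel : Nat) (work stack : List String),
    (loopBGo fuel work stack).1 ++ (loopBGo fuel work stack).2.reverse
      = findMinStrGo fuel work ++ stack.reverse := by
  intro fuel
  induction fuel with
  | zero => intro work stack; rfl
  | succ fuel ih =>
    intro work stack
    by_cases h1 : work.length ≤ 1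
    · simp only [loopBGo]
      rw [if_pos h1, findMinStrGo_short _ work h1]
    · simp only [loopBGo]
      rw [if_neg h1]
      have hpos : 0 < work.length := by omega
      simp only [smaxAux_eq work hpos]
      have hA := scanA_zero work
      cases hI : scanIGo work (smaxSpec work) 0 work.length with
      | none =>
        simp only [hI]
        rw [hI] at hA
        have hA' : scanA work 0 = none := by rw [hA]
        simp only [findMinStrGo]
        rw [if_neg (show ¬ (work.length == 1) = true by simp; omega), hA']
      | some i =>
        simp only [hI]
        rw [hI] at hA
        have hA' : scanA work 0
            = some (i, scanJ work (work.getD i "") (work.length - 1)) := by rw [hA]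
        set j := scanJ work (work.getD i "") (work.length - 1) with hj
        set w := swapL work i j with hw
        have hIH := ih w.dropLast (stack ++ [w.getLastD ""])
        have hFM : findMinStrGo (fuel + 1) work
            = findMinStrGo fuel w.dropLast ++ [w.getLastD ""] := by
          simp only [findMinStrGo]
          rw [if_neg (show ¬ (work.length == 1) = true by simp; omega), hA']
        rw [hIH, hFM]
        simp [List.reverse_append, List.append_assoc]

-- ===== VERDICT (by name: the statement is the Claim_ definition above) =====
theorem findMinStr_spec : Claim_equal_findMinStr := by
  intro array _
  unfold Spec_findMinStr findMinStr_alt findMinStr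
  have h := loopBGo_eq array.length array []
  simp only [List.reverse_nil, List.append_nil] at h
  by_cases he : (loopBGo array.length array []).2.isEmpty
  · simp only [he, if_pos]
    rw [List.isEmpty_iff] at he
    rw [he] at h
    simpa using h.symm
  · rw [if_neg he]
    exact h.symm
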